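-- pv_equiv track=rewrite | github.com/dbmodena/bento | make_charts.py | map_step_key
-- ===== SOURCE A (Python) =====
-- def map_step_key(method):
--     """given a method, it returns the step key
--
--     Keyword arguments:
--     method -- method name
--     Return: step key
--     """
--
--     step_dict = {
--         "i/o": [
--             "read_csv",
--             "read_json",
--             "read_xml",
--             "read_excel",
--             "read_parquet",
--             "read_sql",
--             "load_from_pandas",
--             "to_csv",
--             "load_dataset",
--             "get_pandas_df",
--             "Input",
--             "output",
--         ],
--         "eda": [
--             "locate_null_values",
--             "locate_outliers",
--             "search_by_pattern",
--             "sort",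
--             "get_columns",
--             "get_columns_types",
--             "get_stats",
--             "is_unique",
--             "check_allowed_char",
--             "sample_rows",
--             "query",
--             "find_mismatched_dtypes",
--             "EDA",
--         ],
--         "data_transformation": [
--             "data_transformation",
--             "cast_columns_types",
--             "delete_columns",
--             "rename_columns",
--             "split",
--             "merge_columns",
--             "pivot",
--             "unpivot",
--             "calc_column",
--             "duplicate_columns",
--             "set_index",
--             "join",
--             "append",
--             "min_max_scaler",
--             "one_hot_encoding",
--             "categorical_encoding",
--             "groupby",
--         ],
--         "data_cleaning": [
--             "data_cleaning",
--             "change_date_time_format",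
--             "delete_empty_rows",
--             "set_header_case",
--             "set_content_case",
--             "change_num_format",
--             "round",
--             "drop_duplicates",
--             "get_duplicate_columns",
--             "drop_by_pattern",
--             "fill_nan",
--             "replace",
--             "edit",
--             "set_value",
--             "strip",
--             "remove_diacritics",
--         ],
--     }
--
--     return next((key for key, values in step_dict.items() if method in values), None)
-- ===== SOURCE B (Python) =====
-- # B: one flat lookup table (method -> step key), built by hand in sorted order; the body is a single dict lookup.
-- _KEY_BY_METHOD = {
--     "EDA": "eda",
--     "Input": "i/o",
--     "append": "data_transformation",
--     "calc_column": "data_transformation",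
--     "cast_columns_types": "data_transformation",
--     "categorical_encoding": "data_transformation",
--     "change_date_time_format": "data_cleaning",
--     "change_num_format": "data_cleaning",
--     "check_allowed_char": "eda",
--     "data_cleaning": "data_cleaning",
--     "data_transformation": "data_transformation",
--     "delete_columns": "data_transformation",
--     "delete_empty_rows": "data_cleaning",
--     "drop_by_pattern": "data_cleaning",
--     "drop_duplicates": "data_cleaning",
--     "duplicate_columns": "data_transformation",
--     "edit": "data_cleaning",
--     "fill_nan": "data_cleaning",
--     "find_mismatched_dtypes": "eda",
--     "get_columns": "eda",
--     "get_columns_types": "eda",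
--     "get_duplicate_columns": "data_cleaning",
--     "get_pandas_df": "i/o",
--     "get_stats": "eda",
--     "groupby": "data_transformation",
--     "is_unique": "eda",
--     "join": "data_transformation",
--     "load_dataset": "i/o",
--     "load_from_pandas": "i/o",
--     "locate_null_values": "eda",
--     "locate_outliers": "eda",
--     "merge_columns": "data_transformation",
--     "min_max_scaler": "data_transformation",
--     "one_hot_encoding": "data_transformation",
--     "output": "i/o",
--     "pivot": "data_transformation",
--     "query": "eda",
--     "read_csv": "i/o",
--     "read_excel": "i/o",
--     "read_json": "i/o",
--     "read_parquet": "i/o",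
--     "read_sql": "i/o",
--     "read_xml": "i/o",
--     "remove_diacritics": "data_cleaning",
--     "rename_columns": "data_transformation",
--     "replace": "data_cleaning",
--     "round": "data_cleaning",
--     "sample_rows": "eda",
--     "search_by_pattern": "eda",
--     "set_content_case": "data_cleaning",
--     "set_header_case": "data_cleaning",
--     "set_index": "data_transformation",
--     "set_value": "data_cleaning",
--     "sort": "eda",
--     "split": "data_transformation",
--     "strip": "data_cleaning",
--     "to_csv": "i/o",
--     "unpivot": "data_transformation",
-- }
--
--
-- def map_step_key(method):
--     """given a method, it returns the step key"""
--     return _KEY_BY_METHOD.get(method)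
-- ===== Notes on version B (the rewrite author's own statement) =====
-- stated objective: simpler
-- what changed: B replaces A's per-call scan over four category lists with a single flat precomputed dict keyed by method name, so the function body is one dict lookup.
import Mathlib
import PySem

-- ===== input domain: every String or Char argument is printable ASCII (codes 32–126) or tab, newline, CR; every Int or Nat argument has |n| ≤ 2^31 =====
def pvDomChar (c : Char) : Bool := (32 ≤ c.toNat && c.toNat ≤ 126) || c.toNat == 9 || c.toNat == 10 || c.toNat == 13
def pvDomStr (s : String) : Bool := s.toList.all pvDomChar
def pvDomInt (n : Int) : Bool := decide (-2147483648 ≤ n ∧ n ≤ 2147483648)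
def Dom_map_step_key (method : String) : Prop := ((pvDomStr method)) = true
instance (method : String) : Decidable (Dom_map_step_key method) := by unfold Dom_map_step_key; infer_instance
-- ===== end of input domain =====

-- B replaces A's per-call scan over the four category lists with one flat
-- precomputed method -> key table, so the body is a single lookup (simpler).

-- ===== PORT A =====
-- A's step_dict literal, in Python insertion order
def pvStepPairs : List (String × List String) :=
  [ ("i/o",
      ["read_csv", "read_json", "read_xml", "read_excel", "read_parquet",
       "read_sql", "load_from_pandas", "to_csv", "load_dataset",
       "get_pandas_df", "Input", "output"]),
    ("eda",
      ["locate_null_values", "locate_outliers", "search_by_pattern", "sort",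
       "get_columns", "get_columns_types", "get_stats", "is_unique",
       "check_allowed_char", "sample_rows", "query",
       "find_mismatched_dtypes", "EDA"]),
    ("data_transformation",
      ["data_transformation", "cast_columns_types", "delete_columns",
       "rename_columns", "split", "merge_columns", "pivot", "unpivot",
       "calc_column", "duplicate_columns", "set_index", "join", "append",
       "min_max_scaler", "one_hot_encoding", "categorical_encoding",
       "groupby"]),
    ("data_cleaning",
      ["data_cleaning", "change_date_time_format", "delete_empty_rows",
       "set_header_case", "set_content_case", "change_num_format", "round",
       "drop_duplicates", "get_duplicate_columns", "drop_by_pattern",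
       "fill_nan", "replace", "edit", "set_value", "strip",
       "remove_diacritics"]) ]

-- next((key for key, values in step_dict.items() if method in values), None)
def map_step_key (method : String) : Option String :=
  (pvStepPairs.find? (fun p => p.2.contains method)).map (fun p => p.1)

-- ===== PORT B =====
-- B's flat dict literal _KEY_BY_METHOD, in Source B's (alphabetical) order
def pvKeyByMethod : List (String × String) :=
  [ ("EDA", "eda"),
    ("Input", "i/o"),
    ("append", "data_transformation"),
    ("calc_column", "data_transformation"),
    ("cast_columns_types", "data_transformation"),
    ("categorical_encoding", "data_transformation"),
    ("change_date_time_format", "data_cleaning"),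
    ("change_num_format", "data_cleaning"),
    ("check_allowed_char", "eda"),
    ("data_cleaning", "data_cleaning"),
    ("data_transformation", "data_transformation"),
    ("delete_columns", "data_transformation"),
    ("delete_empty_rows", "data_cleaning"),
    ("drop_by_pattern", "data_cleaning"),
    ("drop_duplicates", "data_cleaning"),
    ("duplicate_columns", "data_transformation"),
    ("edit", "data_cleaning"),
    ("fill_nan", "data_cleaning"),
    ("find_mismatched_dtypes", "eda"),
    ("get_columns", "eda"),
    ("get_columns_types", "eda"),
    ("get_duplicate_columns", "data_cleaning"),
    ("get_pandas_df", "i/o"),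
    ("get_stats", "eda"),
    ("groupby", "data_transformation"),
    ("is_unique", "eda"),
    ("join", "data_transformation"),
    ("load_dataset", "i/o"),
    ("load_from_pandas", "i/o"),
    ("locate_null_values", "eda"),
    ("locate_outliers", "eda"),
    ("merge_columns", "data_transformation"),
    ("min_max_scaler", "data_transformation"),
    ("one_hot_encoding", "data_transformation"),
    ("output", "i/o"),
    ("pivot", "data_transformation"),
    ("query", "eda"),
    ("read_csv", "i/o"),
    ("read_excel", "i/o"),
    ("read_json", "i/o"),
    ("read_parquet", "i/o"),
    ("read_sql", "i/o"),
    ("read_xml", "i/o"),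
    ("remove_diacritics", "data_cleaning"),
    ("rename_columns", "data_transformation"),
    ("replace", "data_cleaning"),
    ("round", "data_cleaning"),
    ("sample_rows", "eda"),
    ("search_by_pattern", "eda"),
    ("set_content_case", "data_cleaning"),
    ("set_header_case", "data_cleaning"),
    ("set_index", "data_transformation"),
    ("set_value", "data_cleaning"),
    ("sort", "eda"),
    ("split", "data_transformation"),
    ("strip", "data_cleaning"),
    ("to_csv", "i/o"),
    ("unpivot", "data_transformation") ]

-- _KEY_BY_METHOD.get(method): first (here: only) binding of the key, else None
def map_step_key_alt (method : String) : Option String :=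
  (pvKeyByMethod.find? (fun q => q.1 == method)).map (fun q => q.2)

-- ===== PRECONDITION & SPEC =====
def Spec_map_step_key (method : String) (out : Option String) : Prop := out = map_step_key_alt method
instance (method : String) (out : Option String) : Decidable (Spec_map_step_key method out) := by unfold Spec_map_step_key; infer_instance

-- ===== CLAIM =====
def Claim_equal_map_step_key : Prop := ∀ (method : String), Dom_map_step_key method → Spec_map_step_key method (map_step_key method)

-- ===== LEMMAS AND PROOFS =====

-- all method names A's scan can ever match
def pvAllNames : List String := pvStepPairs.flatMap (fun p => p.2)

-- on each of the finitely many names either port can match, the two ports agree (finite check)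
theorem pv_agree_on_names :
    (pvAllNames.all (fun n => map_step_key n == map_step_key_alt n)) = true := by decide

-- every key of B's flat table occurs among A's names (finite check)
theorem pv_keys_sub :
    (pvKeyByMethod.all (fun q => pvAllNames.contains q.1)) = true := by decide

theorem pv_A_none {m : String} (h : m ∉ pvAllNames) : map_step_key m = none := by
  rw [map_step_key, Option.map_eq_none_iff, List.find?_eq_none]
  intro p hp
  simp only [List.contains_eq_mem, Bool.not_eq_true, decide_eq_false_iff_not]
  intro hm
  exact h (List.mem_flatMap.mpr ⟨p, hp, hm⟩)

theorem pv_B_none {m : String} (h : m ∉ pvAllNames) : map_step_key_alt m = none := by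
  rw [map_step_key_alt, Option.map_eq_none_iff, List.find?_eq_none]
  intro q hq
  intro hm
  rw [beq_iff_eq] at hm
  subst hm
  have := List.all_eq_true.mp pv_keys_sub q hq
  simp only [List.contains_eq_mem, decide_eq_true_eq] at this
  exact h this

-- ===== VERDICT =====
theorem map_step_key_spec : Claim_equal_map_step_key := by
  intro method _
  show map_step_key method = map_step_key_alt method
  by_cases h : method ∈ pvAllNames
  · have := List.all_eq_true.mp pv_agree_on_names method h
    exact beq_iff_eq.mp this
  · rw [pv_A_none h, pv_B_none h]
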